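-- pv_equiv track=rewrite | github.com/StrixzIV/leaffliction | Distribution.py | group_by_plant
-- ===== SOURCE A (Python) =====
-- from collections import defaultdict
--
-- def group_by_plant(class_counts):
--
--     grouped = defaultdict(dict)
--
--     for class_name, count in class_counts.items():
--         parts = class_name.split("_", 1)
--         plant = parts[0]
--         disease = parts[1] if len(parts) > 1 else class_name
--         grouped[plant][disease] = count
--
--     return grouped
-- ===== SOURCE B (Python) =====
-- from collections import defaultdict
--
--
-- def group_by_plant(class_counts):
--     # phase 1: partition the raw (class_name, count) pairs by plant prefix
--     buckets = defaultdict(list)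
--     for class_name, count in class_counts.items():
--         buckets[class_name.split("_", 1)[0]].append((class_name, count))
--     # phase 2: turn each bucket into its disease -> count dict
--     grouped = defaultdict(dict)
--     for plant, pairs in buckets.items():
--         inner = {}
--         for class_name, count in pairs:
--             parts = class_name.split("_", 1)
--             inner[parts[1] if len(parts) > 1 else class_name] = count
--         grouped[plant] = inner
--     return grouped
-- ===== Notes on version B (the rewrite author's own statement) =====
-- stated objective: alternative
-- what changed: A writes grouped[plant][disease]=count into nested defaultdicts in one pass; B first partitions the raw (class_name, count) pairs into per-plant bucket lists, then in a second phase converts each bucket into its disease->count dict.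
import Mathlib
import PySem

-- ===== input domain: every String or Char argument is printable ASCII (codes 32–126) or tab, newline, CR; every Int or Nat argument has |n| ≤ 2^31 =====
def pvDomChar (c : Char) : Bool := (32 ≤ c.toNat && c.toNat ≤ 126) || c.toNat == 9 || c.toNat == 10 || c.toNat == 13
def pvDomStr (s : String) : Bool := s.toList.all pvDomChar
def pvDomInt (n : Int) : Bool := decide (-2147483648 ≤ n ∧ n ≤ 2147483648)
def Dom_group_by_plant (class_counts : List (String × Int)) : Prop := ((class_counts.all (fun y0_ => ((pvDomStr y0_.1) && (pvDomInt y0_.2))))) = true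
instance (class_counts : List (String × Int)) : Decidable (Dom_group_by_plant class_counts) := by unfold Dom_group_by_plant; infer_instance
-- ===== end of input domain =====

-- B replaces A's single pass of in-place nested defaultdict updates by a two-phase
-- group-by: partition the raw pairs into per-plant buckets, then build each inner dict.

-- ===== PORT A =====
-- A's single pass: grouped[plant][disease] = count via defaultdict(dict)
def group_by_plant (class_counts : List (String × Int)) : List (String × List (String × Int)) :=
  let grouped : PySem.Dict String (PySem.Dict String Int) :=
    class_counts.foldl (fun grouped p =>
      let parts := (PySem.Str.splitMax? p.1 "_" 1).getD []
      let plant := parts.getD 0 ""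
      let disease := if parts.length > 1 then parts.getD 1 "" else p.1
      grouped.modify plant PySem.Dict.empty (fun inner => inner.insert disease p.2))
      PySem.Dict.empty
  grouped.items.map (fun q => (q.1, q.2.items))

-- ===== PORT B =====
def pvPlantOf (class_name : String) : String :=
  ((PySem.Str.splitMax? class_name "_" 1).getD []).getD 0 ""

def pvDiseaseOf (class_name : String) : String :=
  let parts := (PySem.Str.splitMax? class_name "_" 1).getD []
  if parts.length > 1 then parts.getD 1 "" else class_name

-- B: partition the raw pairs into per-plant buckets, then build each inner dict
def group_by_plant_alt (class_counts : List (String × Int)) : List (String × List (String × Int)) :=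
  let buckets : PySem.Dict String (List (String × Int)) :=
    class_counts.foldl (fun b p => b.modify (pvPlantOf p.1) [] (· ++ [p])) PySem.Dict.empty
  buckets.items.map (fun q =>
    (q.1, (q.2.foldl (fun inner p => inner.insert (pvDiseaseOf p.1) p.2)
            (PySem.Dict.empty : PySem.Dict String Int)).items))

-- ===== PRECONDITION & SPEC =====
def Spec_group_by_plant (class_counts : List (String × Int)) (out : List (String × List (String × Int))) : Prop := out = group_by_plant_alt class_counts
instance (class_counts : List (String × Int)) (out : List (String × List (String × Int))) : Decidable (Spec_group_by_plant class_counts out) := by unfold Spec_group_by_plant; infer_instance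

-- ===== CLAIM (what is proved, stated in full; the proofs are below) =====
def Claim_equal_group_by_plant : Prop := ∀ (class_counts : List (String × Int)), Dom_group_by_plant class_counts → Spec_group_by_plant class_counts (group_by_plant class_counts)

-- ===== LEMMAS AND PROOFS =====

-- A's loop body, named for the lemmas
def pvStepA (grouped : PySem.Dict String (PySem.Dict String Int)) (p : String × Int) :
    PySem.Dict String (PySem.Dict String Int) :=
  grouped.modify (pvPlantOf p.1) PySem.Dict.empty
    (fun inner => inner.insert (pvDiseaseOf p.1) p.2)

theorem pvStepA_eq (grouped : PySem.Dict String (PySem.Dict String Int)) (p : String × Int) :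
    (let parts := (PySem.Str.splitMax? p.1 "_" 1).getD []
     let plant := parts.getD 0 ""
     let disease := if parts.length > 1 then parts.getD 1 "" else p.1
     grouped.modify plant PySem.Dict.empty (fun inner => inner.insert disease p.2))
    = pvStepA grouped p := rfl

-- value of A's fold at one plant: the filtered items, inserted in order
theorem pvGetD_foldA (cc : List (String × Int)) (d : PySem.Dict String (PySem.Dict String Int))
    (pl : String) :
    (cc.foldl pvStepA d).getD pl PySem.Dict.empty
      = (cc.filter (fun p => pvPlantOf p.1 == pl)).foldl
          (fun inner p => inner.insert (pvDiseaseOf p.1) p.2)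
          (d.getD pl PySem.Dict.empty) := by
  induction cc generalizing d with
  | nil => simp
  | cons x xs ih =>
      simp only [List.foldl_cons, List.filter_cons]
      by_cases h : pvPlantOf x.1 = pl
      · simp [ih, pvStepA, h]
      · simp [ih, pvStepA, PySem.Dict.getD_modify, h, Ne.symm h]

theorem pvKeys_foldA (cc : List (String × Int)) :
    (cc.foldl pvStepA PySem.Dict.empty).keys
      = PySem.List.dedup (cc.map (fun p => pvPlantOf p.1)) := by
  have h := PySem.Dict.keys_foldl_modify_key cc (fun p => pvPlantOf p.1)
    (d0 := PySem.Dict.empty)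
    (f := fun (d : PySem.Dict String (PySem.Dict String Int)) p inner =>
      inner.insert (pvDiseaseOf p.1) p.2) (d := PySem.Dict.empty)
  simpa [pvStepA, PySem.Dict.keys_empty, PySem.Set.update] using h

theorem pvNodupKeys_foldA (cc : List (String × Int)) :
    (cc.foldl pvStepA PySem.Dict.empty).keys.Nodup := by
  rw [pvKeys_foldA]; exact PySem.List.nodup_dedup _

-- B's bucket fold, as the keyed-pair fold the prelude lemmas speak about
theorem pvBuckets_eq (cc : List (String × Int)) :
    cc.foldl (fun (b : PySem.Dict String (List (String × Int))) p =>
        b.modify (pvPlantOf p.1) [] (· ++ [p])) PySem.Dict.empty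
      = (cc.map (fun p => (pvPlantOf p.1, p))).foldl
          (fun b q => b.modify q.1 [] (· ++ [q.2])) PySem.Dict.empty := by
  rw [List.foldl_map]

theorem pvKeys_buckets (cc : List (String × Int)) :
    (cc.foldl (fun (b : PySem.Dict String (List (String × Int))) p =>
        b.modify (pvPlantOf p.1) [] (· ++ [p])) PySem.Dict.empty).keys
      = PySem.List.dedup (cc.map (fun p => pvPlantOf p.1)) := by
  have h := PySem.Dict.keys_foldl_modify_key cc (fun p => pvPlantOf p.1)
    (d0 := ([] : List (String × Int)))
    (f := fun (_ : PySem.Dict String (List (String × Int))) p l => l ++ [p])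
    (d := PySem.Dict.empty)
  simpa [PySem.Dict.keys_empty, PySem.Set.update] using h

theorem pvNodupKeys_buckets (cc : List (String × Int)) :
    (cc.foldl (fun (b : PySem.Dict String (List (String × Int))) p =>
        b.modify (pvPlantOf p.1) [] (· ++ [p])) PySem.Dict.empty).keys.Nodup := by
  rw [pvKeys_buckets]; exact PySem.List.nodup_dedup _

theorem pvGetD_buckets (cc : List (String × Int)) (pl : String) :
    (cc.foldl (fun (b : PySem.Dict String (List (String × Int))) p =>
        b.modify (pvPlantOf p.1) [] (· ++ [p])) PySem.Dict.empty).getD pl []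
      = cc.filter (fun p => pvPlantOf p.1 == pl) := by
  rw [pvBuckets_eq]
  have h := PySem.Dict.getD_foldl_modify_append
    (l := cc.map (fun p => (pvPlantOf p.1, p))) (d := PySem.Dict.empty) (c := pl)
  simp only [PySem.Dict.getD_empty, List.nil_append] at h
  rw [h, List.filter_map]
  simp [Function.comp_def]

-- ===== VERDICT (by name: the statement is the Claim_ definition above) =====
theorem group_by_plant_spec : Claim_equal_group_by_plant := by
  intro cc _
  unfold Spec_group_by_plant group_by_plant group_by_plant_alt
  simp only [pvStepA_eq]
  rw [PySem.Dict.items_eq_map_keys _ (pvNodupKeys_foldA cc) PySem.Dict.empty,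
      PySem.Dict.items_eq_map_keys _ (pvNodupKeys_buckets cc) ([] : List (String × Int)),
      pvKeys_foldA, pvKeys_buckets]
  simp only [List.map_map]
  refine List.map_congr_left ?_
  intro pl _
  simp only [Function.comp, pvGetD_foldA, pvGetD_buckets, PySem.Dict.getD_empty]
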